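-- pv_equiv track=rewrite | github.com/Kammann123/sae_fend | pygeneral/strings.py | hash_by_ascii
-- ===== SOURCE A (Python) =====
-- def hash_by_ascii(source: str):
--     """ Hashes a string id using the number representation of each
--     character from the array. """
--     hashed_number = 0
--     offset = 0
--
--     for character in reversed(source):
--         buffer_number = ord(character)
--         for i in range(offset):
--             buffer_number *= 10
--         hashed_number += buffer_number
--         offset += len(str(ord(character)))
--
--     return hashed_number
-- ===== SOURCE B (Python) =====
-- def hash_by_ascii(source: str):
--     """ Hashes a string id using the number representation of each
--     character from the array. """
--     result = 0
--     for c in source: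
--         o = ord(c)
--         result = result * 10 ** len(str(o)) + o
--     return result
-- ===== Notes on version B (the rewrite author's own statement) =====
-- stated objective: faster
-- what changed: B folds forward over the string maintaining the accumulated number directly (result = result * 10**len(str(ord(c))) + ord(c)), eliminating A's reversed traversal, its running digit-offset counter and the inner range(offset) multiply loop.
import Mathlib
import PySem

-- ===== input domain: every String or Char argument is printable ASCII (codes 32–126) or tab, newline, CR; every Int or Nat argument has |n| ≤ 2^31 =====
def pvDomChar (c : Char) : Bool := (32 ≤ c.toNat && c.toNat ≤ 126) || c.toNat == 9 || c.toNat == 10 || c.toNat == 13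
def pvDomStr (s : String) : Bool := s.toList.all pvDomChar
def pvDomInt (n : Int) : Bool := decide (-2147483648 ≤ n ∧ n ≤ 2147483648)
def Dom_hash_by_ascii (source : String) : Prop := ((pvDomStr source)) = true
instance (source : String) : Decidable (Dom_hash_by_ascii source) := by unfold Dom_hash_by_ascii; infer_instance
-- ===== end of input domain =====

-- B replaces A's reversed traversal + digit-offset counter + inner multiply loop by a single
-- forward fold shifting the accumulator by each character's decimal width (simpler, same values).

-- ===== PORT A =====
-- A: reversed loop; state = (hashed_number, offset); inner 'for i in range(offset): buffer *= 10'.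
def hash_by_ascii (source : String) : Int :=
  let st := source.toList.reverse.foldl
    (fun (st : Int × Int) (character : Char) =>
      let buffer_number : Int := (character.toNat : Int)
      let buffer_number :=
        (PySem.List.pyRange 0 st.2 1).foldl (fun b _ => b * 10) buffer_number
      (st.1 + buffer_number,
       st.2 + ((PySem.Int.toStr (character.toNat : Int)).length : Int)))
    (0, 0)
  st.1

-- ===== PORT B =====
def hash_by_ascii_alt (source : String) : Int :=
  source.toList.foldl
    (fun (result : Int) (c : Char) =>
      let o : Int := (c.toNat : Int)
      result * 10 ^ ((PySem.Int.toStr o).length) + o)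
    0

-- ===== PRECONDITION & SPEC =====
def Spec_hash_by_ascii (source : String) (out : Int) : Prop := out = hash_by_ascii_alt source
instance (source : String) (out : Int) : Decidable (Spec_hash_by_ascii source out) := by unfold Spec_hash_by_ascii; infer_instance

-- ===== CLAIM (what is proved, stated in full; the proofs are below) =====
def Claim_equal_hash_by_ascii : Prop := ∀ (source : String), Dom_hash_by_ascii source → Spec_hash_by_ascii source (hash_by_ascii source)

-- ===== LEMMAS AND PROOFS =====

-- decimal width of ord c, as Python's len(str(ord(c)))
def pvW (c : Char) : Nat := (PySem.Int.toStr ((c.toNat : Int))).length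

def pvD (cs : List Char) : Nat := (cs.map pvW).sum

def pvF (r : Int) (c : Char) : Int := r * 10 ^ pvW c + (c.toNat : Int)

def pvB (cs : List Char) : Int := cs.foldl pvF 0

theorem pvB_alt (s : String) : hash_by_ascii_alt s = pvB s.toList := rfl

-- inner multiply loop computes b * 10^n
theorem pv_inner (n : Nat) (b : Int) :
    (PySem.List.pyRange 0 (n : Int) 1).foldl (fun b _ => b * 10) b = b * 10 ^ n := by
  induction n generalizing b with
  | zero => simp
  | succ k ih =>
      rw [show ((k + 1 : Nat) : Int) = (k : Int) + 1 by push_cast; ring,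
        PySem.List.pyRange_one_succ_right (by positivity), List.foldl_append, ih]
      simp [pow_succ]; ring

-- shifting the start value of B's fold
theorem pvB_shift (cs : List Char) (a : Int) :
    cs.foldl pvF a = a * 10 ^ pvD cs + pvB cs := by
  induction cs generalizing a with
  | nil => simp [pvB, pvD]
  | cons c rest ih =>
      have h0 : pvB (c :: rest) = ((c.toNat : Int)) * 10 ^ pvD rest + pvB rest := by
        simp only [pvB, List.foldl_cons]
        rw [ih (pvF 0 c)]
        simp [pvF, pvB]
      simp only [List.foldl_cons]
      rw [ih (pvF a c), h0]
      simp only [pvF, pvD, List.map_cons, List.sum_cons, pow_add]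
      ring

-- invariant of A's reversed fold
theorem pvA_inv (cs : List Char) (h : Int) (off : Nat) :
    cs.reverse.foldl
      (fun (st : Int × Int) (character : Char) =>
        (st.1 + (PySem.List.pyRange 0 st.2 1).foldl (fun b _ => b * 10) (character.toNat : Int),
         st.2 + ((PySem.Int.toStr (character.toNat : Int)).length : Int)))
      (h, (off : Int))
    = (h + pvB cs * 10 ^ off, ((off + pvD cs : Nat) : Int)) := by
  induction cs generalizing h off with
  | nil => simp [pvB, pvD]
  | cons c rest ih =>
      rw [List.reverse_cons, List.foldl_append, ih]
      simp only [List.foldl_cons, List.foldl_nil]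
      rw [pv_inner (off + pvD rest) ((c.toNat : Int))]
      have hB : pvB (c :: rest) = ((c.toNat : Int)) * 10 ^ pvD rest + pvB rest := by
        simp only [pvB, List.foldl_cons]
        rw [pvB_shift rest (pvF 0 c)]
        simp [pvF, pvB]
      simp only [Prod.mk.injEq]
      constructor
      · rw [hB]; rw [pow_add]; ring
      · show ((off + pvD rest : Nat) : Int) + ((pvW c : Nat) : Int)
            = ((off + pvD (c :: rest) : Nat) : Int)
        simp only [pvD, List.map_cons, List.sum_cons]
        push_cast
        ring

-- ===== VERDICT (by name: the statement is the Claim_ definition above) =====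
theorem hash_by_ascii_spec : Claim_equal_hash_by_ascii := by
  intro source _
  unfold Spec_hash_by_ascii hash_by_ascii
  rw [pvB_alt]
  have := pvA_inv source.toList 0 0
  simp only [Nat.cast_zero] at this
  simp only [this]
  simp
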